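-- pv_equiv track=rewrite | github.com/Legacy-Fabric/yarn | intermediary_helper.py | parse_intermediary
-- ===== SOURCE A (Python) =====
-- from typing import NamedTuple
--
-- class Intermediaries(NamedTuple):
--     classes: dict # { offical name, class }
--     fields: dict  # { field, signature }
--     methods: dict # { method, signature }
--
-- def parse_intermediary(intermediary_lines: list):
--     itm = Intermediaries({}, {}, {})
--
--     for line in intermediary_lines:
--         if "#" in line:
--             continue
--
--         parts = line.split("\t")
--         if parts[0] == "CLASS":
--             itm.classes[parts[1]] = parts[2]
--         elif parts[0] == "FIELD":
--             itm.fields[parts[4]] = parts[2]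
--         else:
--             itm.methods[parts[4]] = parts[2]
--
--     for f, d in itm.fields.items():
--         itm.fields[f] = remap_signature(d, itm.classes)
--
--     for m, d in itm.methods.items():
--         itm.methods[m] = remap_signature(d, itm.classes)
--
--     return itm
--
-- def remap_signature(signature: str, classes: dict):
--     if not ";" in signature:
--         return signature
--
--     new_sig = ""
--     mnt = ""
--     mnted = False
--     for i in signature:
--         if mnted:
--             if i == ";":
--                 if mnt in classes.keys():
--                     mnt = classes[mnt]
--                 new_sig = new_sig + mnt + ";"
--                 mnted = False
--             else:
--                 mnt = mnt + i
--         else: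
--             if i == "L":
--                 mnted = True
--                 mnt = ""
--             new_sig = new_sig + i
--
--     return new_sig
-- ===== SOURCE B (Python) =====
-- def remap_signature(signature: str, classes: dict):
--     if ";" not in signature:
--         return signature
--     out = []
--     s = signature
--     while True:
--         pre, l, rest = s.partition("L")
--         if not l:
--             out.append(s)
--             break
--         name, semi, s = rest.partition(";")
--         if not semi:
--             out.append(pre + "L")
--             break
--         out.append(pre + "L" + classes.get(name, name) + ";")
--     return "".join(out)
--
--
-- def parse_intermediary(intermediary_lines: list):
--     classes, fields, methods = {}, {}, {}
--     for line in intermediary_lines: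
--         if "#" in line:
--             continue
--         parts = line.split("\t")
--         if parts[0] == "CLASS":
--             classes[parts[1]] = parts[2]
--         elif parts[0] == "FIELD":
--             fields[parts[4]] = parts[2]
--         else:
--             methods[parts[4]] = parts[2]
--     fields = {f: remap_signature(d, classes) for f, d in fields.items()}
--     methods = {m: remap_signature(d, classes) for m, d in methods.items()}
--     return (classes, fields, methods)
-- ===== Notes on version B (the rewrite author's own statement) =====
-- stated objective: alternative
-- what changed: remap_signature is rewritten from a character-by-character state machine (new_sig/mnt/mnted flags) to token-jumping via str.partition on 'L' and ';' that emits whole chunks, and the two signature-remapping passes become dict comprehensions instead of in-place overwrites; Pre_ excludes only lines on which A raises IndexError (a non-comment line whose tab-split has too few fields).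
import Mathlib
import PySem

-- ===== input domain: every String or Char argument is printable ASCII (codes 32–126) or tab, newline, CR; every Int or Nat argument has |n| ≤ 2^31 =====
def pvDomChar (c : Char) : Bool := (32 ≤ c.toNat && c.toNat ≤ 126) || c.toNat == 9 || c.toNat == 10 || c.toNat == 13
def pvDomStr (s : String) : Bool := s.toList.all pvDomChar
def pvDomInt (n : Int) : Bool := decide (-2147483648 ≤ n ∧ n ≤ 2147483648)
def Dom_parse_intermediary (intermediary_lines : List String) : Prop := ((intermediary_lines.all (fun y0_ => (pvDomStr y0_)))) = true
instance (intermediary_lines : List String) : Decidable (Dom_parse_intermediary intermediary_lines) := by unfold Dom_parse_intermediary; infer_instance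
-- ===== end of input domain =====

-- B replaces A's per-character state machine in remap_signature by partition-driven chunk emission
-- and rebuilds the fields/methods dicts by comprehension instead of in-place overwrites (alternative; same cost).


-- ===== PORT A =====
-- strings are carried as List Char (PySem convention); the machine state is (new_sig, mnt, mnted)

def remapA_step (classes : PySem.Dict String String) (st : List Char × List Char × Bool) (i : Char) : List Char × List Char × Bool :=
  if st.2.2 then
    if i = ';' then
      let mnt := (classes.getD (String.mk st.2.1) (String.mk st.2.1)).toList
      (st.1 ++ mnt ++ [';'], mnt, false)
    else (st.1, st.2.1 ++ [i], true)
  else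
    if i = 'L' then (st.1 ++ ['L'], [], true)
    else (st.1 ++ [i], st.2.1, false)


def remap_signatureA (signature : String) (classes : PySem.Dict String String) : String :=
  if !(PySem.Str.isIn ";" signature) then signature
  else String.mk (signature.toList.foldl (remapA_step classes) ([], [], false)).1


def parseStepA (itm : PySem.Dict String String × PySem.Dict String String × PySem.Dict String String)
    (line : String) : PySem.Dict String String × PySem.Dict String String × PySem.Dict String String :=
  if PySem.Str.isIn "#" line then itm
  else
    let parts := (PySem.Str.split? line "\t").getD []
    if PySem.List.pyGetD parts 0 "" = "CLASS" then
      (itm.1.insert (PySem.List.pyGetD parts 1 "") (PySem.List.pyGetD parts 2 ""), itm.2.1, itm.2.2)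
    else if PySem.List.pyGetD parts 0 "" = "FIELD" then
      (itm.1, itm.2.1.insert (PySem.List.pyGetD parts 4 "") (PySem.List.pyGetD parts 2 ""), itm.2.2)
    else
      (itm.1, itm.2.1, itm.2.2.insert (PySem.List.pyGetD parts 4 "") (PySem.List.pyGetD parts 2 ""))


def parse_intermediary (intermediary_lines : List String) : (List (String × String)) × (List (String × String)) × (List (String × String)) :=
  let itm := intermediary_lines.foldl parseStepA (PySem.Dict.empty, PySem.Dict.empty, PySem.Dict.empty)
  let fs := itm.2.1.items.foldl (fun d p => d.insert p.1 (remap_signatureA p.2 itm.1)) itm.2.1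
  let ms := itm.2.2.items.foldl (fun d p => d.insert p.1 (remap_signatureA p.2 itm.1)) itm.2.2
  (itm.1.items, fs.items, ms.items)


-- ===== PORT B =====
-- s.partition(c) for a one-char separator is ported by hand (exact): takeWhile/dropWhile at the first occurrence

def remapB_loop (classes : PySem.Dict String String) (out s : List Char) : List Char :=
  let pre := s.takeWhile (fun c => decide (c ≠ 'L'))
  match h : s.dropWhile (fun c => decide (c ≠ 'L')) with
  | [] => out ++ s
  | _ :: rest =>
    let name := rest.takeWhile (fun c => decide (c ≠ ';'))
    match h2 : rest.dropWhile (fun c => decide (c ≠ ';')) with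
    | [] => out ++ (pre ++ ['L'])
    | _ :: s' =>
      remapB_loop classes
        (out ++ (pre ++ ['L'] ++ (classes.getD (String.mk name) (String.mk name)).toList ++ [';'])) s'
termination_by s.length
decreasing_by
  have hd : (s.dropWhile (fun c => decide (c ≠ 'L'))).length ≤ s.length := List.length_dropWhile_le _ _
  have hd2 : (rest.dropWhile (fun c => decide (c ≠ ';'))).length ≤ rest.length := List.length_dropWhile_le _ _
  rw [h] at hd; rw [h2] at hd2; simp at hd hd2; omega


def remap_signatureB (signature : String) (classes : PySem.Dict String String) : String :=
  if !(PySem.Str.isIn ";" signature) then signature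
  else String.mk (remapB_loop classes [] signature.toList)


def parseStepB (itm : PySem.Dict String String × PySem.Dict String String × PySem.Dict String String)
    (line : String) : PySem.Dict String String × PySem.Dict String String × PySem.Dict String String :=
  if PySem.Str.isIn "#" line then itm
  else
    let parts := (PySem.Str.split? line "\t").getD []
    if PySem.List.pyGetD parts 0 "" = "CLASS" then
      (itm.1.insert (PySem.List.pyGetD parts 1 "") (PySem.List.pyGetD parts 2 ""), itm.2.1, itm.2.2)
    else if PySem.List.pyGetD parts 0 "" = "FIELD" then
      (itm.1, itm.2.1.insert (PySem.List.pyGetD parts 4 "") (PySem.List.pyGetD parts 2 ""), itm.2.2)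
    else
      (itm.1, itm.2.1, itm.2.2.insert (PySem.List.pyGetD parts 4 "") (PySem.List.pyGetD parts 2 ""))


def parse_intermediary_alt (intermediary_lines : List String) : (List (String × String)) × (List (String × String)) × (List (String × String)) :=
  let itm := intermediary_lines.foldl parseStepB (PySem.Dict.empty, PySem.Dict.empty, PySem.Dict.empty)
  let fs := PySem.Dict.ofList (itm.2.1.items.map (fun p => (p.1, remap_signatureB p.2 itm.1)))
  let ms := PySem.Dict.ofList (itm.2.2.items.map (fun p => (p.1, remap_signatureB p.2 itm.1)))
  (itm.1.items, fs.items, ms.items)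


-- ===== PRECONDITION & SPEC =====
-- Pre_ excludes exactly the inputs on which Python A raises IndexError: a line without '#'
-- whose tab-split has fewer than 3 parts (first part "CLASS") resp. fewer than 5 parts (any other first part).
def Pre_parse_intermediary (intermediary_lines : List String) : Prop :=
  ∀ line ∈ intermediary_lines, PySem.Str.isIn "#" line = true ∨
    (let parts := (PySem.Str.split? line "\t").getD []
     if PySem.List.pyGetD parts 0 "" = "CLASS" then 3 ≤ parts.length else 5 ≤ parts.length)
instance (intermediary_lines : List String) : Decidable (Pre_parse_intermediary intermediary_lines) := by
  unfold Pre_parse_intermediary; infer_instance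

def pvWitness_parse_intermediary : List String :=
  ["CLASS\ta\tx/A", "FIELD\ta\tLa;I\tf\tfld", "# comment", "METHOD\ta\t(La;)Lb\tm\tmth"]

def Spec_parse_intermediary (intermediary_lines : List String) (out : (List (String × String)) × (List (String × String)) × (List (String × String))) : Prop := out = parse_intermediary_alt intermediary_lines
instance (intermediary_lines : List String) (out : (List (String × String)) × (List (String × String)) × (List (String × String))) : Decidable (Spec_parse_intermediary intermediary_lines out) := by unfold Spec_parse_intermediary; infer_instance

-- ===== CLAIM (what is proved, stated in full; the proofs are below) =====
def Claim_equal_parse_intermediary : Prop := ∀ (intermediary_lines : List String), Dom_parse_intermediary intermediary_lines → Pre_parse_intermediary intermediary_lines → Spec_parse_intermediary intermediary_lines (parse_intermediary intermediary_lines)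

-- ===== LEMMAS AND PROOFS =====

theorem dropWhile_head_false {p : Char → Bool} {s : List Char} {c : Char} {rest : List Char}
    (h : s.dropWhile p = c :: rest) : p c = false := by
  induction s with
  | nil => simp at h
  | cons a s ih =>
    rw [List.dropWhile_cons] at h
    split at h
    · exact ih h
    · next hp => cases h; simpa using hp


theorem tw_semi_norm (rest : List Char) :
    List.takeWhile (fun c => !decide (c = ';')) rest = List.takeWhile (fun c => decide (c ≠ ';')) rest := by
  simp only [ne_eq, decide_not]


theorem tw_L_norm (s : List Char) :
    List.takeWhile (fun c => !decide (c = 'L')) s = List.takeWhile (fun c => decide (c ≠ 'L')) s := by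
  simp only [ne_eq, decide_not]


-- A's machine passes non-'L' characters through unchanged while not mounted
theorem foldl_stepA_no_L (classes : PySem.Dict String String) (cs : List Char)
    (hcs : ∀ c ∈ cs, c ≠ 'L') (acc m : List Char) :
    cs.foldl (remapA_step classes) (acc, m, false) = (acc ++ cs, m, false) := by
  induction cs generalizing acc with
  | nil => simp
  | cons c cs ih =>
    have hc : c ≠ 'L' := hcs c (by simp)
    simp only [List.foldl_cons, remapA_step, Bool.false_eq_true, if_false, if_neg hc]
    rw [ih (fun x hx => hcs x (by simp [hx]))]
    simp


-- A's machine accumulates non-';' characters into mnt while mounted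
theorem foldl_stepA_no_semi (classes : PySem.Dict String String) (cs : List Char)
    (hcs : ∀ c ∈ cs, c ≠ ';') (acc m : List Char) :
    cs.foldl (remapA_step classes) (acc, m, true) = (acc, m ++ cs, true) := by
  induction cs generalizing m with
  | nil => simp
  | cons c cs ih =>
    have hc : c ≠ ';' := hcs c (by simp)
    simp only [List.foldl_cons, remapA_step, if_true, if_neg hc]
    rw [ih (fun x hx => hcs x (by simp [hx]))]
    simp


-- A's machine agrees with B's partition-jumping loop
theorem main_bounded (classes : PySem.Dict String String) : ∀ (n : Nat) (s : List Char), s.length ≤ n →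
    ∀ (acc m : List Char), (s.foldl (remapA_step classes) (acc, m, false)).1 = remapB_loop classes acc s := by
  intro n
  induction n with
  | zero =>
    intro s hs acc m
    have : s = [] := List.eq_nil_of_length_eq_zero (Nat.le_zero.mp hs)
    subst this
    rw [remapB_loop]
    simp
  | succ n ih =>
    intro s hs acc m
    have hsplit := List.takeWhile_append_dropWhile (p := fun c => decide (c ≠ 'L')) (l := s)
    have hpre : ∀ c ∈ s.takeWhile (fun c => decide (c ≠ 'L')), c ≠ 'L' := by
      intro c hc
      simpa using List.mem_takeWhile_imp hc
    rw [remapB_loop.eq_def]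
    split
    next h =>
      -- dropWhile = [] : s = takeWhile
      have hst : s.takeWhile (fun c => decide (c ≠ 'L')) = s := by
        conv_rhs => rw [← hsplit]
        rw [h]; simp
      have hpre' : ∀ c ∈ s, c ≠ 'L' := by rw [← hst]; exact hpre
      rw [foldl_stepA_no_L classes s hpre']
    next c rest h =>
      have hc : c = 'L' := by simpa using dropWhile_head_false h
      subst hc
      conv_lhs => rw [← hsplit, h]
      rw [List.foldl_append, foldl_stepA_no_L classes _ hpre]
      simp only [List.foldl_cons]
      have hstep : remapA_step classes (acc ++ s.takeWhile (fun c => decide (c ≠ 'L')), m, false) 'L'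
          = (acc ++ s.takeWhile (fun c => decide (c ≠ 'L')) ++ ['L'], [], true) := by
        simp [remapA_step]
      rw [hstep]
      have hsplit2 := List.takeWhile_append_dropWhile (p := fun c => decide (c ≠ ';')) (l := rest)
      have hname : ∀ x ∈ rest.takeWhile (fun c => decide (c ≠ ';')), x ≠ ';' := by
        intro x hx; simpa using List.mem_takeWhile_imp hx
      split
      next h2 =>
        -- no closing ';'
        conv_lhs => rw [← hsplit2, h2, List.append_nil]
        rw [foldl_stepA_no_semi classes _ hname]
        simp [List.append_assoc, tw_semi_norm, tw_L_norm]
      next c2 s' h2 =>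
        have hc2 : c2 = ';' := by simpa using dropWhile_head_false h2
        subst hc2
        conv_lhs => rw [← hsplit2, h2]
        rw [List.foldl_append, foldl_stepA_no_semi classes _ hname]
        simp only [List.foldl_cons]
        have hstep2 : remapA_step classes (acc ++ s.takeWhile (fun c => decide (c ≠ 'L')) ++ ['L'],
            [] ++ rest.takeWhile (fun c => decide (c ≠ ';')), true) ';'
            = (acc ++ s.takeWhile (fun c => decide (c ≠ 'L')) ++ ['L']
                ++ (classes.getD (String.mk (rest.takeWhile (fun c => decide (c ≠ ';')))) (String.mk (rest.takeWhile (fun c => decide (c ≠ ';'))))).toList ++ [';'],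
               (classes.getD (String.mk (rest.takeWhile (fun c => decide (c ≠ ';')))) (String.mk (rest.takeWhile (fun c => decide (c ≠ ';'))))).toList, false) := by
          simp [remapA_step]
        rw [hstep2]
        have hlen : s'.length ≤ n := by
          have hd : (s.dropWhile (fun c => decide (c ≠ 'L'))).length ≤ s.length := List.length_dropWhile_le _ _
          have hd2 : (rest.dropWhile (fun c => decide (c ≠ ';'))).length ≤ rest.length := List.length_dropWhile_le _ _
          rw [h] at hd; rw [h2] at hd2; simp at hd hd2; omega
        rw [ih s' hlen]
        congr 1
        simp [List.append_assoc, tw_semi_norm, tw_L_norm]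


theorem remapA_eq_remapB (signature : String) (classes : PySem.Dict String String) :
    remap_signatureA signature classes = remap_signatureB signature classes := by
  unfold remap_signatureA remap_signatureB
  split
  · rfl
  · rw [main_bounded classes signature.toList.length signature.toList le_rfl]


-- overwriting every key of a dict with a function of its stored value, in items order, maps the items
theorem overwrite_items (f : String → String) (suf : List (String × String)) :
    ∀ (pre : List (String × String)) (d : PySem.Dict String String),
    d.keys.Nodup → d.items = pre ++ suf →
    (suf.foldl (fun d p => d.insert p.1 (f p.2)) d).items = pre ++ suf.map (fun p => (p.1, f p.2)) := by
  induction suf with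
  | nil => intro pre d _ hitems; simpa using hitems
  | cons p suf ih =>
    intro pre d hnd hitems
    have hkeys : d.keys = d.items.map Prod.fst := by simp [PySem.Dict.keys]
    have hmemk : p.1 ∈ d.keys := by rw [hkeys, hitems]; simp
    have hcont : d.contains p.1 = true := (PySem.Dict.contains_iff_mem_keys d p.1).mpr hmemk
    have hnd' : (pre.map Prod.fst ++ p.1 :: suf.map Prod.fst).Nodup := by
      have := hnd
      rw [hkeys, hitems, List.map_append, List.map_cons] at this
      exact this
    obtain ⟨hpre1, hrest, hdis⟩ := List.nodup_append.mp hnd'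
    have hnotpre : ∀ q ∈ pre, q.1 ≠ p.1 := by
      intro q hq he
      have hm : q.1 ∈ pre.map Prod.fst := List.mem_map_of_mem hq
      exact hdis q.1 hm p.1 (by simp) he
    have hnotsuf : ∀ q ∈ suf, q.1 ≠ p.1 := by
      intro q hq he
      have : p.1 ∉ suf.map Prod.fst := (List.nodup_cons.mp hrest).1
      exact this (he ▸ List.mem_map_of_mem hq)
    simp only [List.foldl_cons]
    have hins := PySem.Dict.items_insert_of_contains d (f p.2) hcont
    have hmap : (d.insert p.1 (f p.2)).items = pre ++ (p.1, f p.2) :: suf := by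
      rw [hins, hitems, List.map_append, List.map_cons]
      congr 1
      · have : ∀ q ∈ pre, (if (q.1 == p.1) = true then (p.1, f p.2) else q) = id q := by
          intro q hq
          simp [hnotpre q hq]
        rw [List.map_congr_left this, List.map_id]
      · have hhd : (if (p.1 == p.1) = true then (p.1, f p.2) else p) = (p.1, f p.2) := by simp
        have : ∀ q ∈ suf, (if (q.1 == p.1) = true then (p.1, f p.2) else q) = id q := by
          intro q hq
          simp [hnotsuf q hq]
        rw [hhd, List.map_congr_left this, List.map_id]
    have hknd : (d.insert p.1 (f p.2)).keys.Nodup := by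
      rw [PySem.Dict.keys_insert_of_contains d (f p.2) hcont]; exact hnd
    have := ih (pre ++ [(p.1, f p.2)]) (d.insert p.1 (f p.2)) hknd (by rw [hmap]; simp)
    rw [this]; simp


theorem parseStepA_nodup (t : PySem.Dict String String × PySem.Dict String String × PySem.Dict String String)
    (line : String) (h1 : t.1.keys.Nodup) (h2 : t.2.1.keys.Nodup) (h3 : t.2.2.keys.Nodup) :
    (parseStepA t line).1.keys.Nodup ∧ (parseStepA t line).2.1.keys.Nodup ∧ (parseStepA t line).2.2.keys.Nodup := by
  unfold parseStepA
  split
  · exact ⟨h1, h2, h3⟩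
  · dsimp only
    split
    · exact ⟨PySem.Dict.nodup_keys_insert _ _ _ h1, h2, h3⟩
    · split
      · exact ⟨h1, PySem.Dict.nodup_keys_insert _ _ _ h2, h3⟩
      · exact ⟨h1, h2, PySem.Dict.nodup_keys_insert _ _ _ h3⟩


theorem nodup_keys_parse (lines : List String) :
    ∀ (t : PySem.Dict String String × PySem.Dict String String × PySem.Dict String String),
    t.1.keys.Nodup → t.2.1.keys.Nodup → t.2.2.keys.Nodup →
    (lines.foldl parseStepA t).1.keys.Nodup ∧ (lines.foldl parseStepA t).2.1.keys.Nodup ∧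
      (lines.foldl parseStepA t).2.2.keys.Nodup := by
  induction lines with
  | nil => intro t h1 h2 h3; exact ⟨h1, h2, h3⟩
  | cons l ls ih =>
    intro t h1 h2 h3
    obtain ⟨g1, g2, g3⟩ := parseStepA_nodup t l h1 h2 h3
    exact ih (parseStepA t l) g1 g2 g3


theorem ofList_items_of_nodup (l : List (String × String)) (h : (l.map Prod.fst).Nodup) :
    (PySem.Dict.ofList l).items = l := by
  unfold PySem.Dict.ofList PySem.Dict.update
  have := PySem.Dict.items_foldl_insert_fresh l Prod.fst Prod.snd PySem.Dict.empty
    (fun a _ => by simp [PySem.Dict.contains_empty]) h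
  simpa using this


theorem ports_agree (intermediary_lines : List String) :
    parse_intermediary intermediary_lines = parse_intermediary_alt intermediary_lines := by
  unfold parse_intermediary parse_intermediary_alt
  have hstep : parseStepB = parseStepA := rfl
  rw [hstep]
  obtain ⟨hnd1, hnd2, hnd3⟩ := nodup_keys_parse intermediary_lines
    (PySem.Dict.empty, PySem.Dict.empty, PySem.Dict.empty)
    PySem.Dict.nodup_keys_empty PySem.Dict.nodup_keys_empty PySem.Dict.nodup_keys_empty
  set itm := intermediary_lines.foldl parseStepA (PySem.Dict.empty, PySem.Dict.empty, PySem.Dict.empty) with hitm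
  simp only [Prod.mk.injEq]
  have hmapnd2 : ((itm.2.1.items.map (fun p => (p.1, remap_signatureB p.2 itm.1))).map Prod.fst).Nodup := by
    rw [List.map_map]
    simpa [PySem.Dict.keys, Function.comp] using hnd2
  have hmapnd3 : ((itm.2.2.items.map (fun p => (p.1, remap_signatureB p.2 itm.1))).map Prod.fst).Nodup := by
    rw [List.map_map]
    simpa [PySem.Dict.keys, Function.comp] using hnd3
  refine ⟨trivial, ?_, ?_⟩
  · calc (itm.2.1.items.foldl (fun d p => d.insert p.1 (remap_signatureA p.2 itm.1)) itm.2.1).items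
        = [] ++ itm.2.1.items.map (fun p => (p.1, remap_signatureA p.2 itm.1)) :=
          overwrite_items (fun v => remap_signatureA v itm.1) itm.2.1.items [] itm.2.1 hnd2 (by simp)
      _ = itm.2.1.items.map (fun p => (p.1, remap_signatureB p.2 itm.1)) := by
          simp [remapA_eq_remapB]
      _ = (PySem.Dict.ofList (itm.2.1.items.map (fun p => (p.1, remap_signatureB p.2 itm.1)))).items :=
          (ofList_items_of_nodup _ hmapnd2).symm
  · calc (itm.2.2.items.foldl (fun d p => d.insert p.1 (remap_signatureA p.2 itm.1)) itm.2.2).items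
        = [] ++ itm.2.2.items.map (fun p => (p.1, remap_signatureA p.2 itm.1)) :=
          overwrite_items (fun v => remap_signatureA v itm.1) itm.2.2.items [] itm.2.2 hnd3 (by simp)
      _ = itm.2.2.items.map (fun p => (p.1, remap_signatureB p.2 itm.1)) := by
          simp [remapA_eq_remapB]
      _ = (PySem.Dict.ofList (itm.2.2.items.map (fun p => (p.1, remap_signatureB p.2 itm.1)))).items :=
          (ofList_items_of_nodup _ hmapnd3).symm


-- ===== VERDICT (by name: the statement is the Claim_ definition above) =====
theorem parse_intermediary_spec : Claim_equal_parse_intermediary := by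
  intro intermediary_lines _ _
  exact ports_agree intermediary_lines
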